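-- pv_equiv track=rewrite | github.com/carlomartinez8/el-capi-data | pipeline/sync/sync_apif_warehouse.py | sanitize_search_name
-- ===== SOURCE A (Python) =====
-- def sanitize_search_name(name: str) -> str:
--     """API requires search: only alphanumeric and spaces, min 4 chars."""
--     import unicodedata
--     nfkd = unicodedata.normalize("NFKD", name)
--     ascii_name = "".join(c for c in nfkd if not unicodedata.combining(c))
--     # Keep only letters, digits, spaces
--     clean = "".join(c for c in ascii_name if c.isalnum() or c.isspace()).strip()
--     if len(clean) >= 4:
--         return clean
--     # Use full name or pad: API min 4 chars
--     return clean if len(clean) >= 4 else (clean + " " * (4 - len(clean))).strip() or "abcd"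
-- ===== SOURCE B (Python) =====
-- def sanitize_search_name(name: str) -> str:
--     """API requires search: only alphanumeric and spaces, min 4 chars."""
--     import unicodedata
--     out = []
--     pending = []  # interior whitespace buffered until the next alnum char
--     for c in unicodedata.normalize("NFKD", name):
--         if unicodedata.combining(c):
--             continue
--         if c.isalnum():
--             if out:
--                 out += pending
--             pending = []
--             out.append(c)
--         elif c.isspace():
--             if out:
--                 pending.append(c)
--     return "".join(out) or "abcd"
-- ===== Notes on version B (the rewrite author's own statement) =====
-- stated objective: alternative
-- what changed: B replaces A's staged pipeline (filter out combining marks, filter to alnum/space, strip, then a dead pad-and-strip min-4 branch) with a single-pass state machine: one loop over the normalized string with an output accumulator and a pending-whitespace buffer that is flushed only when another alphanumeric character arrives, so leading/trailing whitespace never enters the output and no separate strip pass or padding branch exists; the empty result falls back to 'abcd'.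
import Mathlib
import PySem

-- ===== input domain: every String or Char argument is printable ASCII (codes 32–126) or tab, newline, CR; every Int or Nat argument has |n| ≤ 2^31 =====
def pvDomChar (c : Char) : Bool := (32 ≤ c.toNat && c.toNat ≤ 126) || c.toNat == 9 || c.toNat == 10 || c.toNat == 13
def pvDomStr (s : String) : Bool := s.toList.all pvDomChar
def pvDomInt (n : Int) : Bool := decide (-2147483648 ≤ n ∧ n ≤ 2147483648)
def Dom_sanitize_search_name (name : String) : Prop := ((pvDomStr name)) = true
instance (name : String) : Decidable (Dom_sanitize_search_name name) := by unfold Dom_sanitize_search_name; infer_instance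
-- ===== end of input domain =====

-- B replaces A's staged filter/filter/strip pipeline (and dead min-4 padding branch) with a
-- single-pass state machine: output accumulator + pending-whitespace buffer flushed on the next
-- alphanumeric character, with an empty-result fallback to "abcd" ("alternative").

-- unicodedata.normalize("NFKD", ·) is the identity on the ASCII domain (exact on Dom)
def pyNFKD (cs : List Char) : List Char := cs
-- unicodedata.combining(c) = 0 for every ASCII character (exact on Dom)
def pyCombining (_c : Char) : Bool := false

-- ===== PORT A =====
def sanitize_search_name (name : String) : String :=
  let nfkd := pyNFKD name.toList
  let ascii_name := nfkd.filter (fun c => !pyCombining c)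
  let clean := PySem.Chars.strip
    (ascii_name.filter (fun c => PySem.Chars.isalnum c || PySem.Chars.isspace c))
  if 4 ≤ clean.length then String.ofList clean
  else
    if 4 ≤ clean.length then String.ofList clean
    else
      let padded := PySem.Chars.strip (clean ++ List.replicate (4 - clean.length) ' ')
      if padded = [] then "abcd" else String.ofList padded

-- ===== PORT B =====
-- the loop over the normalized string: state = (out, pending)
def sanitizeLoop : List Char → List Char → List Char → List Char
  | [], out, _pending => out
  | c :: rest, out, pending =>
    if pyCombining c then sanitizeLoop rest out pending
    else if PySem.Chars.isalnum c then
      sanitizeLoop rest ((if out = [] then out else out ++ pending) ++ [c]) []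
    else if PySem.Chars.isspace c then
      sanitizeLoop rest out (if out = [] then pending else pending ++ [c])
    else sanitizeLoop rest out pending

def sanitize_search_name_alt (name : String) : String :=
  let out := sanitizeLoop (pyNFKD name.toList) [] []
  if out = [] then "abcd" else String.ofList out

-- ===== PRECONDITION & SPEC =====
def Spec_sanitize_search_name (name : String) (out : String) : Prop := out = sanitize_search_name_alt name
instance (name : String) (out : String) : Decidable (Spec_sanitize_search_name name out) := by unfold Spec_sanitize_search_name; infer_instance

-- ===== CLAIM (what is proved, stated in full; the proofs are below) =====
def Claim_equal_sanitize_search_name : Prop := ∀ (name : String), Dom_sanitize_search_name name → Spec_sanitize_search_name name (sanitize_search_name name)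

-- ===== LEMMAS AND PROOFS =====

-- an alphanumeric character is never whitespace
lemma isalnum_not_isspace (c : Char) (h : PySem.Chars.isalnum c = true) :
    PySem.Chars.isspace c = false := by
  have e1 : ('A').val.toNat = 65 := rfl
  have e2 : ('Z').val.toNat = 90 := rfl
  have e3 : ('a').val.toNat = 97 := rfl
  have e4 : ('z').val.toNat = 122 := rfl
  have e5 : ('0').val.toNat = 48 := rfl
  have e6 : ('9').val.toNat = 57 := rfl
  simp only [PySem.Chars.isalnum, PySem.Chars.isalpha, PySem.Chars.isdigit,
    PySem.Chars.isupper, PySem.Chars.islower,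
    Char.le_def, UInt32.le_iff_toNat_le, e1, e2, e3, e4, e5, e6,
    Bool.or_eq_true, Bool.and_eq_true, decide_eq_true_eq] at h
  simp only [PySem.Chars.isspace, Char.toNat, Bool.or_eq_false_iff,
    Bool.and_eq_false_iff, decide_eq_false_iff_not]
  omega

lemma dropWhile_space_replicate_append (k : Nat) (y : List Char) :
    List.dropWhile PySem.Chars.isspace (List.replicate k ' ' ++ y)
      = List.dropWhile PySem.Chars.isspace y := by
  induction k with
  | zero => simp
  | succ n ih =>
    rw [List.replicate_succ, List.cons_append, List.dropWhile_cons]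
    simpa using ih

-- rstrip leaves a list ending in a non-space character unchanged
lemma rstrip_append_nonspace (x : List Char) (c : Char)
    (hc : PySem.Chars.isspace c = false) :
    PySem.Chars.rstrip (x ++ [c]) = x ++ [c] := by
  simp [PySem.Chars.rstrip, hc]

-- rstrip discards an all-space suffix after a non-space ending
lemma rstrip_append_spaces (x p : List Char)
    (hx : PySem.Chars.rstrip x = x)
    (hp : ∀ c ∈ p, PySem.Chars.isspace c = true) :
    PySem.Chars.rstrip (x ++ p) = x := by
  have hrev : List.dropWhile PySem.Chars.isspace p.reverse = [] := by
    apply List.dropWhile_eq_nil_iff.mpr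
    intro c hc; exact hp c (List.mem_reverse.mp hc)
  simp only [PySem.Chars.rstrip, List.reverse_append]
  rw [show p.reverse ++ x.reverse
      = p.reverse ++ x.reverse from rfl]
  rw [List.dropWhile_append]
  simp [hrev]
  have := congrArg List.reverse hx
  simpa [PySem.Chars.rstrip] using hx

-- the loop from a non-empty, right-stripped accumulator computes rstrip of the rest
lemma sanitizeLoop_ne (l : List Char) : ∀ (out pending : List Char),
    out ≠ [] →
    PySem.Chars.rstrip out = out →
    (∀ c ∈ pending, PySem.Chars.isspace c = true) →
    sanitizeLoop l out pending
      = PySem.Chars.rstrip (out ++ pending ++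
          l.filter (fun c => PySem.Chars.isalnum c || PySem.Chars.isspace c)) := by
  induction l with
  | nil =>
    intro out pending hne hr hp
    simp only [sanitizeLoop, List.filter_nil, List.append_nil]
    exact (rstrip_append_spaces out pending hr hp).symm
  | cons c rest ih =>
    intro out pending hne hr hp
    simp only [sanitizeLoop, pyCombining, if_neg (by simp : ¬ (false = true))]
    by_cases ha : PySem.Chars.isalnum c = true
    · have hs := isalnum_not_isspace c ha
      rw [if_pos ha, if_neg hne]
      rw [ih ((out ++ pending) ++ [c]) [] (by simp)
        (rstrip_append_nonspace _ _ hs) (by simp)]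
      simp [ha]
    · rw [if_neg ha]
      by_cases hs : PySem.Chars.isspace c = true
      · rw [if_pos hs, if_neg hne]
        rw [ih out (pending ++ [c]) hne hr
          (by intro d hd; rcases List.mem_append.mp hd with h | h
              · exact hp d h
              · simp at h; subst h; exact hs)]
        simp only [List.filter_cons]
        have : (PySem.Chars.isalnum c || PySem.Chars.isspace c) = true := by
          simp [hs]
        rw [if_pos this]
        simp
      · rw [if_neg hs]
        rw [ih out pending hne hr hp]
        simp only [List.filter_cons]
        have : (PySem.Chars.isalnum c || PySem.Chars.isspace c) = false := by
          simp at ha hs ⊢; exact ⟨ha, hs⟩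
        rw [if_neg (by simp [this])]

-- from the empty state the loop computes strip of the filtered list
lemma sanitizeLoop_nil (l : List Char) :
    sanitizeLoop l [] []
      = PySem.Chars.strip
          (l.filter (fun c => PySem.Chars.isalnum c || PySem.Chars.isspace c)) := by
  induction l with
  | nil => simp [sanitizeLoop, PySem.Chars.strip, PySem.Chars.lstrip, PySem.Chars.rstrip]
  | cons c rest ih =>
    simp only [sanitizeLoop, pyCombining, if_neg (by simp : ¬ (false = true))]
    by_cases ha : PySem.Chars.isalnum c = true
    · have hs := isalnum_not_isspace c ha
      rw [if_pos ha]; simp only [if_true, List.nil_append]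
      rw [sanitizeLoop_ne rest [c] [] (by simp)
        (by simpa using rstrip_append_nonspace [] c hs) (by simp)]
      simp only [List.filter_cons]
      rw [if_pos (by simp [ha])]
      simp only [PySem.Chars.strip, PySem.Chars.lstrip, List.dropWhile_cons, hs]
      simp
    · rw [if_neg ha]
      by_cases hs : PySem.Chars.isspace c = true
      · rw [if_pos hs]; simp only [if_true]; rw [ih]
        simp only [List.filter_cons]
        rw [if_pos (by simp [hs])]
        simp [PySem.Chars.strip, PySem.Chars.lstrip, hs]
      · rw [if_neg hs, ih]
        simp only [List.filter_cons]
        rw [if_neg (by simp at ha hs ⊢; exact ⟨ha, hs⟩)]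

-- a prefix of a dropWhile-fixed list is dropWhile-fixed
lemma dropWhile_prefix_of_self (p : Char → Bool) (l x : List Char)
    (h : List.dropWhile p l = l) (hx : x <+: l) : List.dropWhile p x = x := by
  cases x with
  | nil => simp
  | cons c rest =>
    obtain ⟨t, ht⟩ := hx
    have hc : p c = false := by
      cases hcv : p c with
      | false => rfl
      | true =>
        rw [← ht, List.cons_append, List.dropWhile_cons, hcv] at h
        simp only [if_pos] at h
        have h1 := List.length_dropWhile_le p (rest ++ t)
        have h2 := congrArg List.length h
        simp only [List.length_append, List.length_cons] at h1 h2
        omega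
    simp [hc]

-- stripping an already-stripped list with trailing spaces appended gives it back
lemma strip_append_replicate_of_stripped (x : List Char) (k : Nat)
    (hl : List.dropWhile PySem.Chars.isspace x = x)
    (hr : PySem.Chars.rstrip x = x) :
    PySem.Chars.strip (x ++ List.replicate k ' ') = x := by
  cases x with
  | nil =>
    rw [List.nil_append]
    simp only [PySem.Chars.strip, PySem.Chars.lstrip]
    have : List.dropWhile PySem.Chars.isspace (List.replicate k ' ') = [] := by
      simpa using dropWhile_space_replicate_append k []
    simp [this, PySem.Chars.rstrip]
  | cons c rest =>
    have hc : PySem.Chars.isspace c = false := by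
      cases hcv : PySem.Chars.isspace c with
      | false => rfl
      | true =>
        rw [List.dropWhile_cons, hcv] at hl
        have h1 := List.length_dropWhile_le PySem.Chars.isspace rest
        have h2 := congrArg List.length hl
        simp at h2
        omega
    simp only [PySem.Chars.strip, PySem.Chars.lstrip, List.cons_append,
      List.dropWhile_cons, hc, Bool.false_eq_true, if_false]
    have hr' : List.dropWhile PySem.Chars.isspace (rest.reverse ++ [c])
        = rest.reverse ++ [c] := by
      have := congrArg List.reverse hr
      simpa [PySem.Chars.rstrip] using this
    show (List.dropWhile PySem.Chars.isspace
      (c :: (rest ++ List.replicate k ' ')).reverse).reverse = c :: rest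
    rw [show (c :: (rest ++ List.replicate k ' ')).reverse
        = List.replicate k ' ' ++ (rest.reverse ++ [c]) by simp]
    rw [dropWhile_space_replicate_append, hr']
    simp

lemma strip_strip_append_replicate (l : List Char) (k : Nat) :
    PySem.Chars.strip (PySem.Chars.strip l ++ List.replicate k ' ') = PySem.Chars.strip l := by
  have hz : List.dropWhile PySem.Chars.isspace (PySem.Chars.lstrip l)
      = PySem.Chars.lstrip l := by
    simpa [PySem.Chars.lstrip] using
      List.dropWhile_idempotent PySem.Chars.isspace l
  have hpre : PySem.Chars.strip l <+: PySem.Chars.lstrip l := by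
    have := List.dropWhile_suffix (l := (PySem.Chars.lstrip l).reverse)
      (p := PySem.Chars.isspace)
    simpa [PySem.Chars.strip, PySem.Chars.rstrip] using this.reverse
  have hl : List.dropWhile PySem.Chars.isspace (PySem.Chars.strip l)
      = PySem.Chars.strip l :=
    dropWhile_prefix_of_self _ _ _ hz hpre
  have hr : PySem.Chars.rstrip (PySem.Chars.strip l) = PySem.Chars.strip l := by
    simp [PySem.Chars.strip, PySem.Chars.rstrip, List.dropWhile_idempotent]
  exact strip_append_replicate_of_stripped _ k hl hr

-- ===== VERDICT (by name: the statement is the Claim_ definition above) =====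
theorem sanitize_search_name_spec : Claim_equal_sanitize_search_name := by
  intro name _
  unfold Spec_sanitize_search_name sanitize_search_name sanitize_search_name_alt
  simp only [pyNFKD, pyCombining, Bool.not_false, List.filter_true]
  rw [sanitizeLoop_nil]
  set clean := PySem.Chars.strip
    (name.toList.filter (fun c => PySem.Chars.isalnum c || PySem.Chars.isspace c)) with hclean
  by_cases h4 : 4 ≤ clean.length
  · have hne : clean ≠ [] := by
      intro h; rw [h] at h4; simp at h4
    simp [h4, hne]
  · have hpad : PySem.Chars.strip (clean ++ List.replicate (4 - clean.length) ' ') = clean := by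
      rw [hclean]
      exact strip_strip_append_replicate _ _
    simp only [h4, if_false, hpad]
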